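-- pv_equiv track=rewrite | github.com/mhasan09/leetCode | unique_number_of_occurances.py | unique_number
-- ===== SOURCE A (Python) =====
-- def unique_number(arr):
--     data = {}
--     for i in range(0, len(arr)):
--         if arr[i] in data:
--             data[arr[i]] += 1
--         else:
--             data[arr[i]] = 1
--
--     value = set()
--
--     for i in data:
--         value.add(data[i])
--
--     return len(data) == len(value)
-- ===== SOURCE B (Python) =====
-- def unique_number(arr):
--     counts = {}
--     for x in arr:
--         counts[x] = counts.get(x, 0) + 1
--     vals = sorted(counts.values())
--     return all(a != b for a, b in zip(vals, vals[1:]))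
-- ===== Notes on version B (the rewrite author's own statement) =====
-- stated objective: alternative
-- what changed: Replaces the dedupe-counts-into-a-set-and-compare-lengths check with sorting the counts and scanning once for an equal adjacent pair.
import Mathlib
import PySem

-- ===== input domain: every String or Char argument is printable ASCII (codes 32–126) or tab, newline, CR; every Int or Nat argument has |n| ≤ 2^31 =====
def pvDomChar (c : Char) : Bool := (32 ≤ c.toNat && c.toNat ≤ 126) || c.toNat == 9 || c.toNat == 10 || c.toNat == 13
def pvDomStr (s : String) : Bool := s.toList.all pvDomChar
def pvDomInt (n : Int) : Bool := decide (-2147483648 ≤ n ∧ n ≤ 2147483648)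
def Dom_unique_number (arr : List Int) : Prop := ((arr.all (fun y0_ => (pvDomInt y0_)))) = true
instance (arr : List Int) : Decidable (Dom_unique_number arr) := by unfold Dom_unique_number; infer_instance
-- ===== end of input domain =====

-- B sorts the multiset of counts and scans once for an equal adjacent pair instead of
-- deduplicating the counts into a set and comparing lengths (alternative decomposition).

-- ===== PORT A =====
-- for i in range(0, len(arr)): arr[i] is always in range, so pyGetD's default 0 is never used;
-- data[i] on a key of data never raises, so Dict.getD's default 0 is never used.
def unique_number (arr : List Int) : Bool :=
  let data : PySem.Dict Int Int :=
    (PySem.List.pyRange 0 (PySem.List.len arr) 1).foldl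
      (fun d i =>
        let x := PySem.List.pyGetD arr i 0
        if d.contains x then d.modify x 0 (· + 1) else d.insert x 1)
      PySem.Dict.empty
  let value : PySem.Set Int :=
    data.keys.foldl (fun s k => PySem.Set.add s (data.getD k 0)) PySem.Set.empty
  decide (data.size = PySem.Set.len value)

-- ===== PORT B =====
-- vals[1:] is svals.drop 1 (exact: nonnegative literal slice start).
def unique_number_alt (arr : List Int) : Bool :=
  let counts : PySem.Dict Int Int :=
    arr.foldl (fun d x => d.insert x (d.getD x 0 + 1)) PySem.Dict.empty
  let svals := PySem.List.sorted counts.values (fun v => v) false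
  (svals.zip (svals.drop 1)).all (fun p => p.1 != p.2)

-- ===== PRECONDITION & SPEC =====
def Spec_unique_number (arr : List Int) (out : Bool) : Prop := out = unique_number_alt arr
instance (arr : List Int) (out : Bool) : Decidable (Spec_unique_number arr out) := by unfold Spec_unique_number; infer_instance

-- ===== CLAIM (what is proved, stated in full; the proofs are below) =====
def Claim_equal_unique_number : Prop := ∀ (arr : List Int), Dom_unique_number arr → Spec_unique_number arr (unique_number arr)

-- ===== LEMMAS AND PROOFS =====

-- A's loop body is exactly the Counter step.
lemma stepA_eq : (fun (d : PySem.Dict Int Int) (x : Int) =>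
    if d.contains x then d.modify x 0 (· + 1) else d.insert x 1)
    = fun d x => d.insert x (d.getD x 0 + 1) := by
  funext d x
  by_cases h : d.contains x = true
  · simp [h, PySem.Dict.modify]
  · have h' : d.contains x = false := by simpa using h
    simp [h, PySem.Dict.getD_of_not_contains d 0 h']

-- the zip-with-tail scan is the adjacent-pair chain
lemma zipall_eq_chain (vs : List Int) :
    ((vs.zip (vs.drop 1)).all (fun p => p.1 != p.2) = true) ↔ List.IsChain (· ≠ ·) vs := by
  induction vs with
  | nil => simp
  | cons a t ih =>
    cases t with
    | nil => simp
    | cons b t' =>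
      simp only [List.drop_succ_cons, List.drop_zero, List.zip_cons_cons, List.all_cons,
        Bool.and_eq_true, List.isChain_cons_cons] at *
      simp [ih, bne_iff_ne]

-- on a (≤)-sorted list, no equal adjacent pair is the same as no duplicates at all
lemma chain_ne_iff_nodup (vs : List Int) (h : vs.Pairwise (· ≤ ·)) :
    List.IsChain (· ≠ ·) vs ↔ vs.Nodup := by
  induction vs with
  | nil => simp
  | cons a t ih =>
    rcases List.pairwise_cons.1 h with ⟨ha, ht⟩
    rw [List.isChain_cons, List.nodup_cons, ih ht]
    constructor
    · rintro ⟨hhd, hch⟩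
      refine ⟨?_, hch⟩
      intro hmem
      cases t with
      | nil => simp at hmem
      | cons b t' =>
        have hab : a ≠ b := hhd b rfl
        rcases List.mem_cons.1 hmem with rfl | hmem'
        · exact hab rfl
        · have hba : b ≤ a := (List.pairwise_cons.1 ht).1 a hmem'
          have hab' : a ≤ b := ha b (List.mem_cons_self ..)
          exact hab (le_antisymm hab' hba)
    · rintro ⟨hnm, hch⟩
      refine ⟨?_, hch⟩
      intro x hx
      rintro rfl
      exact hnm (List.mem_of_mem_head? hx)

lemma dedup_len_iff (vs : List Int) :
    vs.length = (PySem.List.dedup vs).length ↔ vs.Nodup := by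
  have hnd : (PySem.List.dedup vs).Nodup := PySem.List.nodup_dedup vs
  have hsub : (PySem.List.dedup vs).Subperm vs :=
    hnd.subperm (fun a ha => (PySem.List.mem_dedup vs a).1 ha)
  constructor
  · intro hlen
    have hperm : (PySem.List.dedup vs).Perm vs := hsub.perm_of_length_le (le_of_eq hlen)
    exact hperm.nodup hnd
  · intro hnodup
    have hperm : (PySem.List.dedup vs).Perm vs :=
      (List.perm_ext_iff_of_nodup hnd hnodup).2 (fun a => by simp)
    exact (hperm.length_eq).symm

-- the core reduction: length-vs-dedup-length test ≡ sort-then-adjacent-scan test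
lemma core (vs : List Int) :
    decide (vs.length = (PySem.List.dedup vs).length)
      = ((PySem.List.sorted vs (fun v => v) false).zip
          ((PySem.List.sorted vs (fun v => v) false).drop 1)).all (fun p => p.1 != p.2) := by
  have hperm : (PySem.List.sorted vs (fun v => v) false).Perm vs :=
    PySem.List.sorted_perm vs (fun v => v) false
  have hpw : (PySem.List.sorted vs (fun v => v) false).Pairwise (· ≤ ·) := by
    simpa using PySem.List.sorted_pairwise vs (fun v => v)
  have hrhs : (((PySem.List.sorted vs (fun v => v) false).zip
        ((PySem.List.sorted vs (fun v => v) false).drop 1)).all (fun p => p.1 != p.2) = true)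
      ↔ vs.Nodup := by
    rw [zipall_eq_chain, chain_ne_iff_nodup _ hpw, hperm.nodup_iff]
  rw [show (((PySem.List.sorted vs (fun v => v) false).zip
        ((PySem.List.sorted vs (fun v => v) false).drop 1)).all (fun p => p.1 != p.2))
      = decide vs.Nodup from by
    rw [Bool.eq_iff_iff, decide_eq_true_eq]; exact hrhs]
  rw [decide_eq_decide]
  exact dedup_len_iff vs

-- A computes the length-vs-dedup-length test on the counter's values
lemma A_char (arr : List Int) :
    unique_number arr
      = decide (((PySem.Dict.counter arr : PySem.Dict Int Int).values.length : Int)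
          = ((PySem.List.dedup (PySem.Dict.counter arr : PySem.Dict Int Int).values).length : Int)) := by
  have hdict : (PySem.List.pyRange 0 (PySem.List.len arr) 1).foldl
      (fun (d : PySem.Dict Int Int) i =>
        let x := PySem.List.pyGetD arr i 0
        if d.contains x then d.modify x 0 (· + 1) else d.insert x 1)
      PySem.Dict.empty = PySem.Dict.counter arr := by
    simp only [PySem.List.len_eq]
    rw [PySem.List.foldl_pyRange_zero_pyGetD' arr 0
      (fun (d : PySem.Dict Int Int) (x : Int) =>
        if d.contains x then d.modify x 0 (· + 1) else d.insert x 1) PySem.Dict.empty,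
      stepA_eq, PySem.Dict.foldl_insert_getD_add_one_eq_counter]
  have hvalue : ∀ c : PySem.Dict Int Int,
      c.keys.foldl (fun s k => PySem.Set.add s (c.getD k 0)) PySem.Set.empty
        = PySem.Set.ofList (c.keys.map (fun k => c.getD k 0)) := by
    intro c
    simp [PySem.Set.ofList, List.foldl_map]
  have hmap : (PySem.Dict.counter arr : PySem.Dict Int Int).keys.map
      (fun k => (PySem.Dict.counter arr : PySem.Dict Int Int).getD k 0)
      = (PySem.Dict.counter arr : PySem.Dict Int Int).values := by
    simp only [PySem.Dict.keys, PySem.Dict.values, PySem.Dict.items_counter, List.map_map]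
    refine List.map_congr_left ?_
    intro k hk
    simp [PySem.Dict.getD_counter]
  have hsize : (PySem.Dict.counter arr : PySem.Dict Int Int).size
      = (PySem.Dict.counter arr : PySem.Dict Int Int).values.length := by
    simp [PySem.Dict.size, PySem.Dict.values]
  unfold unique_number
  simp only [hdict, hvalue, hmap, hsize, PySem.Set.len, PySem.List.dedup]
  rfl

-- B computes the sort-then-scan test on the counter's values
lemma B_char (arr : List Int) :
    unique_number_alt arr
      = ((PySem.List.sorted (PySem.Dict.counter arr : PySem.Dict Int Int).values (fun v => v) false).zip
          ((PySem.List.sorted (PySem.Dict.counter arr : PySem.Dict Int Int).values (fun v => v) false).drop 1)).all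
          (fun p => p.1 != p.2) := by
  unfold unique_number_alt
  rw [PySem.Dict.foldl_insert_getD_add_one_eq_counter]

-- ===== VERDICT (by name: the statement is the Claim_ definition above) =====
theorem unique_number_spec : Claim_equal_unique_number := by
  intro arr _
  unfold Spec_unique_number
  rw [A_char, B_char, ← core]
  rw [decide_eq_decide]
  exact ⟨fun h => by exact_mod_cast h, fun h => by exact_mod_cast h⟩
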